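-- pv_equiv track=rewrite | github.com/Vibenshus-Gymnasium-Pro/pyside6-2-oliver | roeversprog.py | oversaet_fra_roeversprog_til_andet_sprog
-- ===== SOURCE A (Python) =====
-- def oversaet_fra_roeversprog_til_andet_sprog(inputtekst):
--     outputtekst = ""
--     i = 0
--     while i < len(inputtekst):
--         bogstav = inputtekst[i]
--         # Hvis vi finder et mønster som konsonant + 'o' + samme konsonant, springer vi det rigtige antal tegn over
--         if (i+2 < len(inputtekst) and
--             inputtekst[i].lower() == inputtekst[i+2].lower() and
--             inputtekst[i+1] == 'o' and
--             inputtekst[i].lower() in "bcdfghjklmnpqrstvwxz"):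
--             outputtekst += bogstav
--             i += 3
--         else:
--             outputtekst += bogstav
--             i += 1
--     return outputtekst
-- ===== SOURCE B (Python) =====
-- CONSONANTS = "bcdfghjklmnpqrstvwxz"
--
-- def oversaet_fra_roeversprog_til_andet_sprog(inputtekst):
--     n = len(inputtekst)
--     chunks = []
--     pos = 0        # start of the not-yet-copied part
--     search = 1     # next index at which to look for the middle 'o'
--     while True:
--         j = inputtekst.find('o', search)
--         if j == -1 or j >= n - 1:
--             chunks.append(inputtekst[pos:])
--             return ''.join(chunks)
--         if (inputtekst[j-1].lower() == inputtekst[j+1].lower() and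
--                 inputtekst[j-1].lower() in CONSONANTS):
--             chunks.append(inputtekst[pos:j])   # keep the first consonant, drop 'o'+consonant
--             pos = j + 2
--             search = j + 3
--         else:
--             search = j + 1
-- ===== Notes on version B (the rewrite author's own statement) =====
-- stated objective: faster
-- what changed: A scans the string one character at a time with an index and per-character string concatenation; B jumps directly between occurrences of the inserted vowel via str.find and copies whole untouched chunks by slicing, joining them at the end.
import Mathlib
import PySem

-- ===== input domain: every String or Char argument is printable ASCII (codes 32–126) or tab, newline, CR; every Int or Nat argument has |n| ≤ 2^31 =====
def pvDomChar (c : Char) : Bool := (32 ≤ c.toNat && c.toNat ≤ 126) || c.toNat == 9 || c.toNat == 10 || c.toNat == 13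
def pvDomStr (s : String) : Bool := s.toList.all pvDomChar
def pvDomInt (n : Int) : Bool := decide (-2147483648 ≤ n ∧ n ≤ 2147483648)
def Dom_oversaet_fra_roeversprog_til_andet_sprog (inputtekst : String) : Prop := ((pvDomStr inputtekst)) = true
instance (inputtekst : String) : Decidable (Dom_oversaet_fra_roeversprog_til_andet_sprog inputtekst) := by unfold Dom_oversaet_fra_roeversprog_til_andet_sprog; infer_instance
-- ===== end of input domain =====

-- B replaces A's character-by-character index scan by str.find jumps between occurrences
-- of the inserted vowel with whole-chunk copying; objective: faster (measured).

-- ===== PORT A =====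
-- the consonant alphabet "bcdfghjklmnpqrstvwxz" from A's membership test
def pvConsonants : List Char := "bcdfghjklmnpqrstvwxz".toList

-- A's while-loop: index i, output accumulator
def pvALoop (s : List Char) (out : List Char) (i : Nat) : List Char :=
  if h : i < s.length then
    let bogstav := s[i]
    if h2 : i + 2 < s.length then
      if PySem.Chars.lowerChar s[i] == PySem.Chars.lowerChar (s[i+2]'h2) &&
         ((s[i+1]'(by omega)) == 'o') &&
         PySem.Chars.isIn [PySem.Chars.lowerChar s[i]] pvConsonants then
        pvALoop s (out ++ [bogstav]) (i + 3)
      else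
        pvALoop s (out ++ [bogstav]) (i + 1)
    else
      pvALoop s (out ++ [bogstav]) (i + 1)
  else out
termination_by s.length - i

def oversaet_fra_roeversprog_til_andet_sprog (inputtekst : String) : String :=
  String.ofList (pvALoop inputtekst.toList [] 0)

-- ===== PORT B =====
-- Source B's consonant-pair test: s[j-1].lower() == s[j+1].lower() and s[j-1].lower() in CONSONANTS
def pvPair (c1 c3 : Char) : Bool :=
  PySem.Chars.lowerChar c1 == PySem.Chars.lowerChar c3 &&
  PySem.Chars.isIn [PySem.Chars.lowerChar c1] pvConsonants

-- needed by pvBLoop's termination: find past the end returns -1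
theorem pvFindFrom_past (s sub : List Char) (k : Nat) (h : s.length < k) :
    PySem.Chars.findFrom s sub (k : Int) none = -1 := by
  simp only [PySem.Chars.findFrom]
  have h0 : ¬ ((k : Int) < 0) := by omega
  have h1 : (s.length : Int) < (k : Int) := by exact_mod_cast h
  simp [h0, h1]

-- Source B's while loop: chunks of the input between matches, pos = start of the uncopied rest,
-- search = next index at which to look for the inserted vowel
def pvBLoop (s : List Char) (chunks : List (List Char)) (pos search : Nat) : List (List Char) :=
  let j := PySem.Chars.findFrom s ['o'] (search : Int) none
  if hs : j = -1 ∨ (s.length : Int) - 1 ≤ j then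
    chunks ++ [PySem.List.slice s (some (pos : Int)) none]
  else
    if pvPair (PySem.List.pyGetD s (j - 1) ' ') (PySem.List.pyGetD s (j + 1) ' ') then
      pvBLoop s (chunks ++ [PySem.List.slice s (some (pos : Int)) (some j)]) (j.toNat + 2) (j.toNat + 3)
    else
      pvBLoop s chunks pos (j.toNat + 1)
termination_by s.length + 2 - search
decreasing_by
  all_goals
    rename_i hj
    push Not at hs
    obtain ⟨h1, h2⟩ := hs
    by_cases hk : search ≤ s.length
    · have := (PySem.Chars.findFrom_natCast_spec s ['o'] search hk h1).1
      have hnn : 0 ≤ PySem.Chars.findFrom s ['o'] (search : Int) none := le_trans (by omega) this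
      omega
    · exact absurd (pvFindFrom_past s ['o'] search (by omega)) h1

def oversaet_fra_roeversprog_til_andet_sprog_alt (inputtekst : String) : String :=
  String.ofList (pvBLoop inputtekst.toList [] 0 1).flatten

-- ===== PRECONDITION & SPEC =====
def Spec_oversaet_fra_roeversprog_til_andet_sprog (inputtekst : String) (out : String) : Prop := out = oversaet_fra_roeversprog_til_andet_sprog_alt inputtekst
instance (inputtekst : String) (out : String) : Decidable (Spec_oversaet_fra_roeversprog_til_andet_sprog inputtekst out) := by unfold Spec_oversaet_fra_roeversprog_til_andet_sprog; infer_instance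

-- ===== CLAIM (what is proved, stated in full; the proofs are below) =====
def Claim_equal_oversaet_fra_roeversprog_til_andet_sprog : Prop := ∀ (inputtekst : String), Dom_oversaet_fra_roeversprog_til_andet_sprog inputtekst → Spec_oversaet_fra_roeversprog_til_andet_sprog inputtekst (oversaet_fra_roeversprog_til_andet_sprog inputtekst)

-- ===== LEMMAS AND PROOFS =====

-- the decoding as one structural recursion, the common specification of both loops
def pvCond3 (c1 c2 c3 : Char) : Bool := (c2 == 'o') && pvPair c1 c3

def rspec : List Char → List Char
  | [] => []
  | [c] => [c]
  | [c1, c2] => [c1, c2]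
  | c1 :: c2 :: c3 :: rest =>
      if pvCond3 c1 c2 c3 then c1 :: rspec rest else c1 :: rspec (c2 :: c3 :: rest)

lemma pvCond3_eq (c1 c2 c3 : Char) :
    (PySem.Chars.lowerChar c1 == PySem.Chars.lowerChar c3 && (c2 == 'o') &&
     PySem.Chars.isIn [PySem.Chars.lowerChar c1] pvConsonants) = pvCond3 c1 c2 c3 := by
  simp only [pvCond3, pvPair]
  cases PySem.Chars.lowerChar c1 == PySem.Chars.lowerChar c3 <;>
    cases (c2 == 'o') <;>
      cases PySem.Chars.isIn [PySem.Chars.lowerChar c1] pvConsonants <;> rfl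

-- A's loop computes rspec of the rest of the input
lemma pvALoop_eq (s : List Char) (out : List Char) (i : Nat) :
    pvALoop s out i = out ++ rspec (s.drop i) := by
  induction out, i using pvALoop.induct (s := s) with
  | case1 out i h bogstav h2 hc ih =>
      rw [pvALoop]
      simp only [h, reduceDIte, h2, hc]
      rw [ih]
      have hd : s.drop i = s[i] :: s[i+1] :: s[i+2] :: s.drop (i+3) := by
        rw [List.drop_eq_getElem_cons (by omega), List.drop_eq_getElem_cons (by omega),
            List.drop_eq_getElem_cons (by omega)]
      rw [hd, rspec]
      rw [pvCond3_eq] at hc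
      simp [hc]
      rfl
  | case2 out i h bogstav h2 hc ih =>
      rw [pvALoop]
      simp only [h, reduceDIte, h2, hc]
      rw [ih]
      have hd : s.drop i = s[i] :: s[i+1] :: s[i+2] :: s.drop (i+3) := by
        rw [List.drop_eq_getElem_cons (by omega), List.drop_eq_getElem_cons (by omega),
            List.drop_eq_getElem_cons (by omega)]
      rw [hd, rspec]
      rw [pvCond3_eq] at hc
      simp [hc]
      rfl
  | case3 out i h bogstav h2 ih =>
      rw [pvALoop]
      simp only [h, reduceDIte, h2]
      rw [ih]
      have hd : s.drop i = s[i] :: s.drop (i+1) := List.drop_eq_getElem_cons h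
      rw [hd]
      have : s.drop (i+1) = [] ∨ ∃ c, s.drop (i+1) = [c] := by
        have hl : (s.drop (i+1)).length ≤ 1 := by simp; omega
        cases he : s.drop (i+1) with
        | nil => exact Or.inl rfl
        | cons a t => right; exact ⟨a, by rw [he] at hl; simp at hl; simp [hl]⟩
      rcases this with he | ⟨c, he⟩ <;> rw [he, rspec] <;> simp <;> rfl
  | case4 out i h =>
      rw [pvALoop]
      simp only [h, reduceDIte]
      rw [List.drop_eq_nil_of_le (by omega : s.length ≤ i), rspec]
      simp


-- "no match can start in positions [lo-1, hi-1)": every 'o' strictly before index hi and at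
-- index ≥ lo with a full triple around it fails the consonant-pair test
def pvNoMatch (s : List Char) (lo hi : Nat) : Prop :=
  ∀ k, lo ≤ k → k < hi → k + 1 < s.length → s[k]? = some 'o' →
    pvPair (s.getD (k-1) ' ') (s.getD (k+1) ' ') = false

lemma pv_prefix_singleton (c : Char) (l : List Char) : ([c] <+: l) ↔ l.head? = some c := by
  constructor
  · rintro ⟨t, rfl⟩; rfl
  · intro h
    cases l with
    | nil => simp at h
    | cons a t => simp at h; exact ⟨t, by simp [h]⟩

-- rspec copies the input unchanged when no match is possible anywhere
lemma rspec_id (cs : List Char)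
    (h : ∀ k, 1 ≤ k → k + 1 < cs.length → cs.getD k ' ' = 'o' →
      pvPair (cs.getD (k-1) ' ') (cs.getD (k+1) ' ') = false) :
    rspec cs = cs := by
  induction cs using rspec.induct with
  | case1 => rfl
  | case2 c => rfl
  | case3 c1 c2 => rfl
  | case4 c1 c2 c3 rest hc _ =>
      exfalso
      simp only [pvCond3, Bool.and_eq_true, beq_iff_eq] at hc
      have h1 := h 1 le_rfl (by simp) (by simp [hc.1])
      simp only [List.getD_cons_succ, List.getD_cons_zero, Nat.sub_self] at h1
      rw [hc.2] at h1
      exact absurd h1 (by simp)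
  | case5 c1 c2 c3 rest hc ih =>
      rw [rspec, if_neg hc]
      congr 1
      apply ih
      intro k hk1 hk2 ho
      obtain ⟨k', rfl⟩ : ∃ k', k = k' + 1 := ⟨k - 1, by omega⟩
      have h2 := h (k' + 2) (by omega) (by simp at hk2 ⊢; omega)
        (by simpa [List.getD_cons_succ] using ho)
      have e1 : k' + 2 - 1 = k' + 1 := by omega
      have e2 : k' + 1 - 1 = k' := by omega
      rw [e1] at h2
      rw [e2]
      simpa [List.getD_cons_succ] using h2


-- rspec copies up to just before the first possible match
lemma rspec_skip (m : Nat) (cs : List Char) (h1 : 1 ≤ m) (hm : m ≤ cs.length)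
    (h : ∀ k, 1 ≤ k → k < m → k + 1 < cs.length → cs.getD k ' ' = 'o' →
      pvPair (cs.getD (k-1) ' ') (cs.getD (k+1) ' ') = false) :
    rspec cs = cs.take (m-1) ++ rspec (cs.drop (m-1)) := by
  induction m, h1 using Nat.le_induction generalizing cs with
  | base => simp
  | succ m hm1 ih =>
    cases cs with
    | nil => simp at hm
    | cons c1 t =>
      cases t with
      | nil => simp at hm; omega
      | cons c2 t2 =>
        have hstep : rspec (c1 :: c2 :: t2) = c1 :: rspec (c2 :: t2) := by
          cases t2 with
          | nil => simp [rspec]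
          | cons c3 r =>
            rw [rspec]
            have hcond : pvCond3 c1 c2 c3 = false := by
              by_cases ho : c2 = 'o'
              · have hp := h 1 le_rfl (by omega) (by simp)
                  (by simp [ho])
                simp only [List.getD_cons_succ, List.getD_cons_zero, Nat.sub_self] at hp
                simp [pvCond3, ho, hp]
              · simp [pvCond3, ho]
            simp [hcond]
        rw [hstep]
        rw [ih (c2 :: t2) (by simp at hm ⊢; omega) ?_]
        · obtain ⟨m', rfl⟩ : ∃ m', m = m' + 1 := ⟨m - 1, by omega⟩
          simp [List.take_succ_cons, List.drop_succ_cons]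
        · intro k hk1 hk2 hkl ho
          obtain ⟨k', rfl⟩ : ∃ k', k = k' + 1 := ⟨k - 1, by omega⟩
          have h2 := h (k' + 2) (by omega) (by omega) (by simp at hkl ⊢; omega)
            (by simpa [List.getD_cons_succ] using ho)
          have e1 : k' + 2 - 1 = k' + 1 := by omega
          have e2 : k' + 1 - 1 = k' := by omega
          rw [e1] at h2
          rw [e2]
          simpa [List.getD_cons_succ] using h2


lemma pvFind_none (s : List Char) (search : Nat)
    (hj : PySem.Chars.findFrom s ['o'] (search : Int) none = -1) :
    ∀ p, search ≤ p → s[p]? ≠ some 'o' := by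
  intro p hp hcon
  by_cases hk : search ≤ s.length
  · rw [PySem.Chars.findFrom_natCast_eq_neg_one_iff s ['o'] search hk] at hj
    apply hj
    rw [List.singleton_infix_iff]
    have hd : (s.drop search)[p - search]? = some 'o' := by
      rw [List.getElem?_drop, Nat.add_sub_cancel' hp]; exact hcon
    exact List.mem_of_getElem? hd
  · have hlen : s.length ≤ p := by omega
    simp [List.getElem?_eq_none hlen] at hcon

lemma pvFind_facts (s : List Char) (search : Nat)
    (hj : PySem.Chars.findFrom s ['o'] (search : Int) none ≠ -1) :
    search ≤ s.length ∧
    0 ≤ PySem.Chars.findFrom s ['o'] (search : Int) none ∧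
    search ≤ (PySem.Chars.findFrom s ['o'] (search : Int) none).toNat ∧
    s[(PySem.Chars.findFrom s ['o'] (search : Int) none).toNat]? = some 'o' ∧
    ∀ p, search ≤ p → p < (PySem.Chars.findFrom s ['o'] (search : Int) none).toNat →
      s[p]? ≠ some 'o' := by
  have hk : search ≤ s.length := by
    by_contra hk
    exact hj (pvFindFrom_past s ['o'] search (by omega))
  obtain ⟨hge, hpre, hmin⟩ := PySem.Chars.findFrom_natCast_spec s ['o'] search hk hj
  have hnn : 0 ≤ PySem.Chars.findFrom s ['o'] (search : Int) none :=
    le_trans (by exact_mod_cast Int.natCast_nonneg search) hge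
  refine ⟨hk, hnn, by omega, ?_, ?_⟩
  · rw [pv_prefix_singleton] at hpre; rwa [List.head?_drop] at hpre
  · intro p hp1 hp2 hcon
    apply hmin p hp1 hp2
    rw [pv_prefix_singleton, List.head?_drop]; exact hcon

-- absolute-position no-match facts become the relative hypothesis of rspec_id/rspec_skip
lemma pvRelB (s : List Char) (pos bound : Nat)
    (habs : ∀ p, pos + 1 ≤ p → p < bound → p + 1 < s.length → s[p]? = some 'o' →
      pvPair (s.getD (p-1) ' ') (s.getD (p+1) ' ') = false) :
    ∀ k, 1 ≤ k → pos + k < bound → k + 1 < (s.drop pos).length → (s.drop pos).getD k ' ' = 'o' →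
      pvPair ((s.drop pos).getD (k-1) ' ') ((s.drop pos).getD (k+1) ' ') = false := by
  intro k hk1 hkb hkl ho
  have hlen : (s.drop pos).length = s.length - pos := by simp
  have hplen : pos + k + 1 < s.length := by omega
  rw [List.getD_eq_getElem?_getD, List.getElem?_drop] at ho
  have hsome : s[pos+k]? = some 'o' := by
    cases hx : s[pos+k]? with
    | none => rw [hx] at ho; exact absurd ho (by decide)
    | some c => rw [hx] at ho; simp at ho; rw [ho]
  have hres := habs (pos+k) (by omega) hkb hplen hsome
  rw [List.getD_eq_getElem?_getD, List.getD_eq_getElem?_getD, List.getElem?_drop, List.getElem?_drop,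
      show pos + (k-1) = pos + k - 1 by omega, show pos + (k+1) = pos + k + 1 by omega]
  rw [List.getD_eq_getElem?_getD, List.getD_eq_getElem?_getD] at hres
  exact hres

-- B's loop computes rspec of the uncopied rest of the input
lemma pvBLoop_eq (s : List Char) (chunks : List (List Char)) (pos search : Nat) :
    pos + 1 ≤ search → search ≤ s.length + 1 → pvNoMatch s (pos + 1) search →
    (pvBLoop s chunks pos search).flatten = chunks.flatten ++ rspec (s.drop pos) := by
  induction chunks, pos, search using pvBLoop.induct (s := s) with
  | case1 chunks pos search j hj =>
    intro hps hsl hnm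
    rw [pvBLoop]
    rw [dif_pos hj]
    rw [PySem.List.slice_from_natCast]
    simp only [List.flatten_append, List.flatten_cons, List.flatten_nil, List.append_nil]
    congr 1
    refine (rspec_id _ ?_).symm
    intro k hk1 hkl ho
    refine pvRelB s pos (s.length + 1) ?_ k hk1 (by
      have : (s.drop pos).length = s.length - pos := by simp
      omega) hkl ho
    intro p hp1 _ hpl hpo
    by_cases hc : p < search
    · exact hnm p hp1 hc hpl hpo
    · rcases hj with hj | hj
      · exact absurd hpo (pvFind_none s search hj p (by omega))
      · by_cases hj0 : PySem.Chars.findFrom s ['o'] (search : Int) none = -1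
        · exact absurd hpo (pvFind_none s search hj0 p (by omega))
        · obtain ⟨_, hnn, _, _, hmin⟩ := pvFind_facts s search hj0
          exact absurd hpo (hmin p (by omega) (by omega))
  | case2 chunks pos search j hs hpair ih =>
    intro hps hsl hnm
    have hjdef : j = PySem.Chars.findFrom s ['o'] (search : Int) none := rfl
    clear_value j
    have hj1 : PySem.Chars.findFrom s ['o'] (search : Int) none ≠ -1 := by
      rw [← hjdef]; intro hx; exact hs (Or.inl hx)
    obtain ⟨hk, hnn, hge, hsome, hmin⟩ := pvFind_facts s search hj1
    rw [← hjdef] at hnn hge hsome hmin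
    obtain ⟨jn, rfl⟩ : ∃ n : Nat, j = (n : Int) := ⟨j.toNat, (Int.toNat_of_nonneg hnn).symm⟩
    simp only [Int.toNat_natCast] at hge hsome hmin ih ⊢
    have hj2 : ¬ ((s.length : Int) - 1 ≤ (jn : Int)) := fun hx => hs (Or.inr hx)
    have hjlen : jn + 1 < s.length := by omega
    have hjn1 : 1 ≤ jn := by omega
    have hg1 : PySem.List.pyGetD s ((jn : Int) - 1) ' ' = s.getD (jn - 1) ' ' := by
      rw [show ((jn : Int)) - 1 = ((jn - 1 : Nat) : Int) by omega, PySem.List.pyGetD_natCast]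
    have hg2 : PySem.List.pyGetD s ((jn : Int) + 1) ' ' = s.getD (jn + 1) ' ' := by
      rw [show ((jn : Int)) + 1 = ((jn + 1 : Nat) : Int) by omega, PySem.List.pyGetD_natCast]
    rw [pvBLoop, ← hjdef]
    rw [dif_neg hs, if_pos hpair]
    simp only [Int.toNat_natCast]
    rw [ih (by omega) (by omega) (by intro p hp1 hp2; omega)]
    simp only [List.flatten_append, List.flatten_cons, List.flatten_nil, List.append_nil]
    have hskip := rspec_skip (jn - pos) (s.drop pos) (by omega)
      (by simp; omega) ?_
    · rw [hskip]
      rw [List.drop_drop]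
      have hdem : pos + (jn - pos - 1) = jn - 1 := by omega
      rw [hdem]
      have hc1 : s[jn-1]? = some s[jn-1] := List.getElem?_eq_getElem (by omega)
      have hc3 : s[jn+1]? = some s[jn+1] := List.getElem?_eq_getElem (by omega)
      have hdrop : s.drop (jn - 1) = s[jn-1] :: 'o' :: s[jn+1] :: s.drop (jn + 2) := by
        rw [List.drop_eq_getElem_cons (by omega), List.drop_eq_getElem_cons (by omega),
            List.drop_eq_getElem_cons (by omega)]
        have e1 : jn - 1 + 1 = jn := by omega
        have e2 : jn - 1 + 1 + 1 = jn + 1 := by omega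
        have e3 : jn - 1 + 1 + 1 + 1 = jn + 2 := by omega
        simp only [e1]
        have : s[jn] = 'o' := by
          have := List.getElem?_eq_getElem (l := s) (i := jn) (by omega)
          rw [this] at hsome; exact Option.some.inj hsome
        rw [this]
      rw [hdrop, rspec]
      have hpv : pvPair s[jn-1] s[jn+1] = true := by
        rw [hg1, hg2] at hpair
        rw [List.getD_eq_getElem?_getD, List.getD_eq_getElem?_getD, hc1, hc3] at hpair
        exact hpair
      have hcond : pvCond3 s[jn-1] 'o' s[jn+1] = true := by
        simp [pvCond3, hpv]
      rw [if_pos hcond]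
      rw [PySem.List.slice_natCast]
      have htake : List.take (jn - pos) (s.drop pos) =
          List.take (jn - pos - 1) (s.drop pos) ++ [s[jn-1]] := by
        have e : jn - pos = (jn - pos - 1) + 1 := by omega
        rw [e, List.take_add_one]
        congr 1
        rw [List.getElem?_drop, hdem, hc1]
        rfl
      rw [htake]
      simp [List.append_assoc]
    · intro k hk1 hkm hkl ho
      refine pvRelB s pos jn ?_ k hk1 (by omega) hkl ho
      intro p hp1 hpb hpl hpo
      by_cases hc : p < search
      · exact hnm p hp1 hc hpl hpo
      · exact absurd hpo (hmin p (by omega) (by omega))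
  | case3 chunks pos search j hs hpair ih =>
    intro hps hsl hnm
    have hjdef : j = PySem.Chars.findFrom s ['o'] (search : Int) none := rfl
    clear_value j
    have hj1 : PySem.Chars.findFrom s ['o'] (search : Int) none ≠ -1 := by
      rw [← hjdef]; intro hx; exact hs (Or.inl hx)
    obtain ⟨hk, hnn, hge, hsome, hmin⟩ := pvFind_facts s search hj1
    rw [← hjdef] at hnn hge hsome hmin
    obtain ⟨jn, rfl⟩ : ∃ n : Nat, j = (n : Int) := ⟨j.toNat, (Int.toNat_of_nonneg hnn).symm⟩
    simp only [Int.toNat_natCast] at hge hsome hmin ih ⊢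
    have hj2 : ¬ ((s.length : Int) - 1 ≤ (jn : Int)) := fun hx => hs (Or.inr hx)
    have hjlen : jn + 1 < s.length := by omega
    have hjn1 : 1 ≤ jn := by omega
    have hg1 : PySem.List.pyGetD s ((jn : Int) - 1) ' ' = s.getD (jn - 1) ' ' := by
      rw [show ((jn : Int)) - 1 = ((jn - 1 : Nat) : Int) by omega, PySem.List.pyGetD_natCast]
    have hg2 : PySem.List.pyGetD s ((jn : Int) + 1) ' ' = s.getD (jn + 1) ' ' := by
      rw [show ((jn : Int)) + 1 = ((jn + 1 : Nat) : Int) by omega, PySem.List.pyGetD_natCast]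
    rw [pvBLoop, ← hjdef]
    rw [dif_neg hs, if_neg hpair]
    simp only [Int.toNat_natCast]
    apply ih (by omega) (by omega)
    intro p hp1 hp2 hpl hpo
    by_cases hc : p < search
    · exact hnm p hp1 hc hpl hpo
    · by_cases hpj : p < jn
      · exact absurd hpo (hmin p (by omega) hpj)
      · have hpeq : p = jn := by omega
        subst hpeq
        rw [hg1, hg2] at hpair
        simpa using hpair

-- ===== VERDICT (by name: the statement is the Claim_ definition above) =====
theorem oversaet_fra_roeversprog_til_andet_sprog_spec : Claim_equal_oversaet_fra_roeversprog_til_andet_sprog := by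
  intro s _
  unfold Spec_oversaet_fra_roeversprog_til_andet_sprog
  unfold oversaet_fra_roeversprog_til_andet_sprog oversaet_fra_roeversprog_til_andet_sprog_alt
  rw [pvALoop_eq]
  rw [pvBLoop_eq s.toList [] 0 1 (by omega) (by omega)
    (fun k hk1 hk2 => absurd (lt_of_le_of_lt hk1 hk2) (lt_irrefl 1))]
  simp
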